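-- pv_equiv track=rewrite | github.com/junseyu2/SUGRA_Nicolai_map | prove/spl.py | _split_top_level_addsub
-- ===== SOURCE A (Python) =====
-- def _split_top_level_addsub(s):
--
--     if not s:
--         return []
--
--     terms = []
--     depth = 0
--     start = 0
--
--     for i, ch in enumerate(s):
--         if ch == "(":
--             depth += 1
--         elif ch == ")":
--             depth -= 1
--         elif depth == 0 and ch in "+-":
--             # 맨 앞 부호는 자르지 않음 (unary +/-)
--             if i == start:
--                 continue
--             terms.append(s[start:i])
--             start = i
--
--     terms.append(s[start:])
--
--     return terms #[t for t in terms if t and t != "+"]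
-- ===== SOURCE B (Python) =====
-- def _split_top_level_addsub(s):
--     if not s:
--         return []
--     # Pass 1: split at EVERY sign (ignoring parentheses entirely); each sign
--     # after the first character starts a new fragment.
--     frags = []
--     cur = s[0]
--     for ch in s[1:]:
--         if ch in "+-":
--             frags.append(cur)
--             cur = ch
--         else:
--             cur += ch
--     frags.append(cur)
--     # Pass 2: glue fragments back together while the running parenthesis
--     # balance is nonzero; a fragment boundary is a real cut exactly when the
--     # cumulative balance of everything before it is zero.
--     terms = []
--     cur = frags[0]
--     bal = cur.count("(") - cur.count(")")
--     for f in frags[1:]: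
--         if bal == 0:
--             terms.append(cur)
--             cur = f
--         else:
--             cur += f
--         bal += f.count("(") - f.count(")")
--     terms.append(cur)
--     return terms
-- ===== Notes on version B (the rewrite author's own statement) =====
-- stated objective: alternative
-- what changed: B splits the string at EVERY +/- sign while ignoring parentheses entirely, then in a second pass re-glues adjacent fragments whose running parenthesis balance (obtained by counting '(' and ')' per fragment) is nonzero; A instead does one depth-tracking scan that slices at top-level signs.
import Mathlib
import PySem

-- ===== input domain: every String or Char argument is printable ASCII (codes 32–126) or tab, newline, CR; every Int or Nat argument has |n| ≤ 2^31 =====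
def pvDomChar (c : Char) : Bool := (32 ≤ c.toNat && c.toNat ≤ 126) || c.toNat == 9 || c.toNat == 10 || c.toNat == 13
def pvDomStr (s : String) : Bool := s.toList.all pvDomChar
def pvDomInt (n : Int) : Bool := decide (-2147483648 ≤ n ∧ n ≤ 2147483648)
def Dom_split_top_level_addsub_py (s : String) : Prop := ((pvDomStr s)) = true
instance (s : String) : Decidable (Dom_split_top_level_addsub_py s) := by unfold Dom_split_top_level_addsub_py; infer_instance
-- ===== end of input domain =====

-- B replaces A's depth-tracking slice-at-top-level scan by: split at EVERY sign
-- (ignoring parentheses), then re-glue fragments whose running paren balance is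
-- nonzero; an alternative decomposition of the same cost.

-- ===== PORT A =====
-- one step of A's loop body: state = (terms, depth, start), input = (i, ch)
def pvAstep (cs : List Char) (st : List (List Char) × Int × Int) (ic : Int × Char) :
    List (List Char) × Int × Int :=
  if ic.2 = '(' then (st.1, st.2.1 + 1, st.2.2)
  else if ic.2 = ')' then (st.1, st.2.1 - 1, st.2.2)
  else if st.2.1 = 0 ∧ (ic.2 = '+' ∨ ic.2 = '-') then
    if ic.1 = st.2.2 then st
    else (st.1 ++ [PySem.List.slice cs (some st.2.2) (some ic.1)], st.2.1, ic.1)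
  else st

def split_top_level_addsub_py (s : String) : List String :=
  let cs := s.toList
  if cs = [] then []
  else
    let st := (PySem.List.enumerate cs).foldl (pvAstep cs) ([], 0, 0)
    (st.1 ++ [PySem.List.slice cs (some st.2.2) none]).map String.ofList

-- ===== PORT B =====
-- f.count("(") - f.count(")"); List.count is exact for a single-character needle
def pvBalance (f : List Char) : Int := (f.count '(' : Int) - (f.count ')' : Int)

-- pass 1 step: state = (frags, cur); a sign starts a new fragment
def pvFragStep (st : List (List Char) × List Char) (ch : Char) :
    List (List Char) × List Char :=
  if ch = '+' ∨ ch = '-' then (st.1 ++ [st.2], [ch]) else (st.1, st.2 ++ [ch])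

-- pass 2 step: state = (terms, cur, bal); cut exactly when the balance is zero
def pvMergeStep (st : List (List Char) × List Char × Int) (f : List Char) :
    List (List Char) × List Char × Int :=
  if st.2.2 = 0 then (st.1 ++ [st.2.1], f, st.2.2 + pvBalance f)
  else (st.1, st.2.1 ++ f, st.2.2 + pvBalance f)

-- pass 2: cur = frags[0]; bal = balance(frags[0]); fold over frags[1:]
def pvMergeRun (fs : List (List Char)) : List (List Char) × List Char × Int :=
  match fs with
  | [] => ([], [], 0)   -- unreachable: the fragment list is never empty
  | f0 :: ft => ft.foldl pvMergeStep ([], f0, pvBalance f0)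

def split_top_level_addsub_py_alt (s : String) : List String :=
  match s.toList with
  | [] => []
  | c0 :: rest =>
    let fr := rest.foldl pvFragStep ([], [c0])
    let st := pvMergeRun (fr.1 ++ [fr.2])
    (st.1 ++ [st.2.1]).map String.ofList

-- ===== PRECONDITION & SPEC =====
def Spec_split_top_level_addsub_py (s : String) (out : List String) : Prop := out = split_top_level_addsub_py_alt s
instance (s : String) (out : List String) : Decidable (Spec_split_top_level_addsub_py s out) := by unfold Spec_split_top_level_addsub_py; infer_instance

-- ===== CLAIM (what is proved, stated in full; the proofs are below) =====
def Claim_equal_split_top_level_addsub_py : Prop := ∀ (s : String), Dom_split_top_level_addsub_py s → Spec_split_top_level_addsub_py s (split_top_level_addsub_py s)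

-- ===== LEMMAS AND PROOFS =====

lemma pvBalance_append (f g : List Char) : pvBalance (f ++ g) = pvBalance f + pvBalance g := by
  simp [pvBalance, List.count_append]; ring

lemma pvBalance_single (c : Char) (h1 : c ≠ '(') (h2 : c ≠ ')') : pvBalance [c] = 0 := by
  simp [pvBalance, h1, h2]

lemma pvMergeRun_snoc (fs : List (List Char)) (f : List Char) (h : fs ≠ []) :
    pvMergeRun (fs ++ [f]) = pvMergeStep (pvMergeRun fs) f := by
  cases fs with
  | nil => exact absurd rfl h
  | cons f0 ft => simp [pvMergeRun, List.foldl_append]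

lemma pvMergeRun_extend (F : List (List Char)) (cur : List Char) (c : Char) :
    pvMergeRun (F ++ [cur ++ [c]]) =
      ((pvMergeRun (F ++ [cur])).1,
       (pvMergeRun (F ++ [cur])).2.1 ++ [c],
       (pvMergeRun (F ++ [cur])).2.2 + pvBalance [c]) := by
  cases F with
  | nil => simp [pvMergeRun, pvBalance_append]
  | cons f0 ft =>
      rw [pvMergeRun_snoc (f0 :: ft) (cur ++ [c]) (by simp),
          pvMergeRun_snoc (f0 :: ft) cur (by simp)]
      unfold pvMergeStep
      split_ifs <;> simp [pvBalance_append] <;> ring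

-- slicing with in-range Nat indices is take/drop
lemma pvSliceEq (cs : List Char) (start k : Nat) :
    PySem.List.slice cs (some (start : Int)) (some (k : Int)) = (cs.take k).drop start := by
  rw [PySem.List.slice_toNat cs (by positivity) (by positivity)]
  simp [List.drop_take]

-- extending the processed prefix by its next character extends the segment
lemma pvSegExt (cs : List Char) (k start : Nat) (c : Char) (t : List Char)
    (h : cs.drop k = c :: t) (hs : start ≤ k) :
    (cs.take (k+1)).drop start = (cs.take k).drop start ++ [c] := by
  have hk : k < cs.length := by
    by_contra hh
    rw [List.drop_eq_nil_of_le (by omega)] at h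
    simp at h
  have hck : cs[k]? = some c := by rw [← List.head?_drop, h]; rfl
  rw [List.take_add_one, hck, List.drop_append_of_le_length (by simp; omega)]
  rfl

-- main invariant: A's remaining loop and B's remaining pass-1 fold (with pass 2
-- applied to the fragments) assemble the same list of terms
lemma pvInv (cs : List Char) : ∀ (rest : List Char) (k : Nat) (terms F : List (List Char))
    (cur : List Char) (depth : Int) (start : Nat),
    cs.drop k = rest → start < k →
    pvMergeRun (F ++ [cur]) = (terms, (cs.take k).drop start, depth) →
    ((PySem.List.enumerate rest (k:Int)).foldl (pvAstep cs) (terms, depth, (start:Int))).1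
      ++ [PySem.List.slice cs
            (some ((PySem.List.enumerate rest (k:Int)).foldl (pvAstep cs) (terms, depth, (start:Int))).2.2) none]
    = (pvMergeRun ((rest.foldl pvFragStep (F, cur)).1 ++ [(rest.foldl pvFragStep (F, cur)).2])).1
      ++ [(pvMergeRun ((rest.foldl pvFragStep (F, cur)).1 ++ [(rest.foldl pvFragStep (F, cur)).2])).2.1] := by
  intro rest
  induction rest with
  | nil =>
      intro k terms F cur depth start hdrop hlt hinv
      have hlen : cs.length ≤ k := by
        by_contra hh
        rw [List.drop_eq_nil_iff] at hdrop
        omega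
      rw [List.take_of_length_le hlen] at hinv
      simp only [PySem.List.enumerate_nil, List.foldl_nil, hinv]
      rw [PySem.List.slice_some_none, PySem.List.clampIdx_natCast]
      have : cs.drop (min start cs.length) = cs.drop start := by
        rcases le_or_gt start cs.length with h | h
        · rw [Nat.min_eq_left h]
        · rw [Nat.min_eq_right (by omega), List.drop_length, List.drop_eq_nil_of_le (by omega)]
      rw [this]
  | cons c t ih =>
      intro k terms F cur depth start hdrop hlt hinv
      have hk : k < cs.length := by
        by_contra hh
        rw [List.drop_eq_nil_of_le (by omega)] at hdrop
        simp at hdrop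
      have ht : cs.drop (k+1) = t := by
        rw [← List.drop_drop, hdrop]; rfl
      have hseg : (cs.take (k+1)).drop start = (cs.take k).drop start ++ [c] :=
        pvSegExt cs k start c t hdrop (by omega)
      have hsegk : (cs.take (k+1)).drop k = [c] := by
        rw [pvSegExt cs k k c t hdrop le_rfl, List.drop_eq_nil_of_le (by simp)]
        rfl
      simp only [PySem.List.enumerate_cons, List.foldl_cons]
      by_cases h1 : c = '('
      · subst h1
        rw [show pvAstep cs (terms, depth, (start:Int)) ((k:Int), '(') = (terms, depth + 1, (start:Int)) from by
              simp [pvAstep],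
            show pvFragStep (F, cur) '(' = (F, cur ++ ['(']) from by simp [pvFragStep]]
        exact ih (k+1) terms F (cur ++ ['(']) (depth+1) start ht (by omega)
          (by rw [pvMergeRun_extend, hinv, hseg]
              show _ = (terms, (cs.take k).drop start ++ ['('], depth + 1)
              norm_num [pvBalance])
      · by_cases h2 : c = ')'
        · subst h2
          rw [show pvAstep cs (terms, depth, (start:Int)) ((k:Int), ')') = (terms, depth - 1, (start:Int)) from by
                simp [pvAstep],
              show pvFragStep (F, cur) ')' = (F, cur ++ [')']) from by simp [pvFragStep]]
          exact ih (k+1) terms F (cur ++ [')']) (depth-1) start ht (by omega)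
            (by rw [pvMergeRun_extend, hinv, hseg]
                show _ = (terms, (cs.take k).drop start ++ [')'], depth - 1)
                norm_num [pvBalance]
                ring)
        · by_cases h3 : c = '+' ∨ c = '-'
          · have hbal : pvBalance [c] = 0 := by
              rcases h3 with h | h <;> subst h <;> decide
            have hfrag : pvFragStep (F, cur) c = (F ++ [cur], [c]) := by
              simp [pvFragStep, h3]
            by_cases hd : depth = 0
            · subst hd
              have hA : pvAstep cs (terms, 0, (start:Int)) ((k:Int), c)
                  = (terms ++ [PySem.List.slice cs (some (start:Int)) (some (k:Int))], 0, (k:Int)) := by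
                unfold pvAstep
                rw [if_neg (by simp [h1]), if_neg (by simp [h2]),
                    if_pos ⟨rfl, h3⟩, if_neg (by simp; omega)]
              rw [hA, hfrag, pvSliceEq]
              exact ih (k+1) (terms ++ [(cs.take k).drop start]) (F ++ [cur]) [c] 0 k ht (by omega)
                (by rw [pvMergeRun_snoc _ _ (by simp), hinv]
                    show _ = (terms ++ [(cs.take k).drop start], (cs.take (k+1)).drop k, 0)
                    rw [hsegk]
                    simp [pvMergeStep, hbal])
            · have hA : pvAstep cs (terms, depth, (start:Int)) ((k:Int), c) = (terms, depth, (start:Int)) := by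
                unfold pvAstep
                rw [if_neg (by simp [h1]), if_neg (by simp [h2]), if_neg (by simp [hd])]
              rw [hA, hfrag]
              exact ih (k+1) terms (F ++ [cur]) [c] depth start ht (by omega)
                (by rw [pvMergeRun_snoc _ _ (by simp), hinv, hseg]
                    simp [pvMergeStep, hd, hbal])
          · have hA : pvAstep cs (terms, depth, (start:Int)) ((k:Int), c) = (terms, depth, (start:Int)) := by
              unfold pvAstep
              rw [if_neg (by simp [h1]), if_neg (by simp [h2]), if_neg (by simp [h3])]
            have hfrag : pvFragStep (F, cur) c = (F, cur ++ [c]) := by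
              simp [pvFragStep, h3]
            rw [hA, hfrag]
            exact ih (k+1) terms F (cur ++ [c]) depth start ht (by omega)
              (by rw [pvMergeRun_extend, hinv, hseg,
                      pvBalance_single c h1 h2]
                  simp)

-- ===== VERDICT (by name: the statement is the Claim_ definition above) =====
theorem split_top_level_addsub_py_spec : Claim_equal_split_top_level_addsub_py := by
  intro s _
  unfold Spec_split_top_level_addsub_py split_top_level_addsub_py split_top_level_addsub_py_alt
  cases hcs : s.toList with
  | nil => simp
  | cons c0 t =>
      simp only [List.cons_ne_nil, if_neg, not_false_eq_true]
      have hst1 : pvAstep (c0 :: t) ([], 0, 0) ((0:Int), c0) = ([], pvBalance [c0], ((0:Nat):Int)) := by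
        by_cases h1 : c0 = '('
        · subst h1; simp [pvAstep]; decide
        · by_cases h2 : c0 = ')'
          · subst h2; simp [pvAstep]; decide
          · by_cases h3 : c0 = '+' ∨ c0 = '-'
            · have : pvBalance [c0] = 0 := by rcases h3 with h | h <;> subst h <;> decide
              rw [this]
              unfold pvAstep
              rw [if_neg (by simp [h1]), if_neg (by simp [h2]), if_pos ⟨rfl, h3⟩, if_pos rfl]
              norm_num
            · rw [pvBalance_single c0 h1 h2]
              unfold pvAstep
              rw [if_neg (by simp [h1]), if_neg (by simp [h2]), if_neg (by simp [h3])]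
              norm_num
      have hmain := pvInv (c0 :: t) t 1 [] [] [c0] (pvBalance [c0]) 0 rfl (by omega)
        (by simp [pvMergeRun])
      simp only [PySem.List.enumerate_cons, List.foldl_cons, hst1]
      norm_num at hmain ⊢
      rw [hmain.1, hmain.2]
      exact ⟨rfl, rfl⟩
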